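-- pv_equiv track=rewrite | github.com/xiaoliliu99/algorithm-practice | assignment2.py | ideal_place
-- ===== SOURCE A (Python) =====
-- def ideal_place(relevant):
--     """
--     desc: find a point that to all relevant point has the minimum distance.
--     time complexity: O(n), n is the length of the relevant
--     space complexity: O(n)
--     :param relevant: a list of relevant points.
--     :return: o_point, which is the optimal point for the kiosk
--     """
--     # for special case, relevant has one point or is empty.
--     if len(relevant) == 0:
--         return []
--     if len(relevant) == 1:
--         return relevant[0]
--     # separately store the x and y values.
--     x = []
--     y = []
--     for i in relevant:
--         x.append(i[0])
--         y.append(i[1])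
--
--     # calculate the mean of x and y
--     x_sum = 0
--     y_sum = 0
--     for i in range(len(x)):
--         x_sum += x[i]
--         y_sum += y[i]
--
--     x_mean = x_sum // len(x)
--     y_mean = y_sum // len(y)
--
--     # calculate the median of x and y
--     x_idx = len(x) // 2
--     y_idx = len(y) // 2
--
--     x.sort()
--     y.sort()
--
--     x_median = x[x_idx]
--     y_median = y[y_idx]
--     # calculate the minimum distance from these two point.
--     mean_dist = 0
--     median_dist = 0
--     for i in relevant:
--         mean_dist += (abs(x_mean - i[0]) + abs(y_mean - i[1]))
--         median_dist += (abs(x_median - i[0]) + abs(y_median - i[1]))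
--     # return the smaller one
--     if mean_dist < median_dist:
--         return [x_mean, y_mean]
--     else:
--         return [x_median, y_median]
-- ===== SOURCE B (Python) =====
-- def _select(a, k):
--     """k-th smallest of a (0-based), iterative quickselect, middle-element pivot."""
--     while len(a) > 1:
--         pivot = a[len(a) // 2]
--         lt = [v for v in a if v < pivot]
--         if k < len(lt):
--             a = lt
--             continue
--         gt = [v for v in a if pivot < v]
--         if k < len(a) - len(gt):
--             return pivot
--         k -= len(a) - len(gt)
--         a = gt
--     return a[0]
--
--
-- def ideal_place(relevant):
--     if len(relevant) == 0:
--         return []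
--     if len(relevant) == 1:
--         return relevant[0]
--     n = len(relevant)
--     xs = [p[0] for p in relevant]
--     ys = [p[1] for p in relevant]
--     x_mean = sum(xs) // n
--     y_mean = sum(ys) // n
--     x_median = _select(xs, n // 2)
--     y_median = _select(ys, n // 2)
--     mean_dist = sum(abs(x_mean - p[0]) + abs(y_mean - p[1]) for p in relevant)
--     median_dist = sum(abs(x_median - p[0]) + abs(y_median - p[1]) for p in relevant)
--     return [x_mean, y_mean] if mean_dist < median_dist else [x_median, y_median]
-- ===== Notes on version B (the rewrite author's own statement) =====
-- stated objective: alternative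
-- what changed: B replaces A's full sort of the x and y lists by an iterative quickselect (middle-element pivot) that finds the index-n//2 order statistic directly, and replaces A's append/index-accumulator loops by comprehensions and sum().
import Mathlib
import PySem

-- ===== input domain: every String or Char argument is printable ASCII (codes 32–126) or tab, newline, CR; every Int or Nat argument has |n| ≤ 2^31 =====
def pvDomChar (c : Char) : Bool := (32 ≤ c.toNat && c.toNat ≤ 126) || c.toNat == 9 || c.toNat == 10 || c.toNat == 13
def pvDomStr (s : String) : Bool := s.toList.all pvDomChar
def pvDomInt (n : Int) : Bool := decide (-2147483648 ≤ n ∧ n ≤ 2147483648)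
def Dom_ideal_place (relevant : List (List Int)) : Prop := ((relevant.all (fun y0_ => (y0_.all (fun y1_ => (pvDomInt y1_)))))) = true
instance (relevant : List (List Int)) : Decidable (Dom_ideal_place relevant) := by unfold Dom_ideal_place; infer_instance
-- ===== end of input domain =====

-- B replaces A's full sorts of the coordinate lists by an iterative quickselect for the
-- n//2-th order statistic and A's accumulator loops by map/sum (alternative algorithm).


-- ===== PORT A =====
-- i[0] / i[1] and x[i] are ported with pyGetD (total); under Pre_ every index is in range,
-- so the default value is never read.
def ideal_place (relevant : List (List Int)) : List Int :=
  if relevant.length = 0 then []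
  else if relevant.length = 1 then relevant.headD []
  else
    let xy := relevant.foldl
      (fun (s : List Int × List Int) i =>
        (s.1 ++ [PySem.List.pyGetD i 0 0], s.2 ++ [PySem.List.pyGetD i 1 0])) ([], [])
    let x := xy.1
    let y := xy.2
    let sums := (PySem.List.pyRange 0 (x.length : Int) 1).foldl
      (fun (s : Int × Int) i => (s.1 + PySem.List.pyGetD x i 0, s.2 + PySem.List.pyGetD y i 0)) (0, 0)
    let x_mean := PySem.Int.floordiv sums.1 (x.length : Int)
    let y_mean := PySem.Int.floordiv sums.2 (y.length : Int)
    let x_idx := PySem.Int.floordiv (x.length : Int) 2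
    let y_idx := PySem.Int.floordiv (y.length : Int) 2
    let xs := PySem.List.sorted x (fun v => v) false
    let ys := PySem.List.sorted y (fun v => v) false
    let x_median := PySem.List.pyGetD xs x_idx 0
    let y_median := PySem.List.pyGetD ys y_idx 0
    let dists := relevant.foldl
      (fun (s : Int × Int) i =>
        (s.1 + (|x_mean - PySem.List.pyGetD i 0 0| + |y_mean - PySem.List.pyGetD i 1 0|),
         s.2 + (|x_median - PySem.List.pyGetD i 0 0| + |y_median - PySem.List.pyGetD i 1 0|))) (0, 0)
    if dists.1 < dists.2 then [x_mean, y_mean] else [x_median, y_median]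

-- ===== PORT B =====
-- iterative quickselect of Source B (`_select`): the while-loop as structural recursion on a
-- fuel that starts at the list length (each pass strictly shrinks the list, pvFilterPivotLt,
-- so the fuel never runs out on the calls pvSelect makes)
def pvSelectGo : Nat → List Int → Nat → Int
  | 0, a, _ => a.headD 0
  | fuel + 1, a, k =>
    if a.length ≤ 1 then a.headD 0   -- a[0]; reachable calls keep k < a.length, so a ≠ []
    else
      let pivot := a.getD (a.length / 2) 0
      if k < (a.filter (fun v => decide (v < pivot))).length then
        pvSelectGo fuel (a.filter (fun v => decide (v < pivot))) k
      else if k < a.length - (a.filter (fun v => decide (pivot < v))).length then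
        pivot
      else
        pvSelectGo fuel (a.filter (fun v => decide (pivot < v)))
          (k - (a.length - (a.filter (fun v => decide (pivot < v))).length))

def pvSelect (a : List Int) (k : Nat) : Int := pvSelectGo a.length a k

def ideal_place_alt (relevant : List (List Int)) : List Int :=
  if relevant.length = 0 then []
  else if relevant.length = 1 then relevant.headD []
  else
    let n := relevant.length
    let xs := relevant.map (fun p => PySem.List.pyGetD p 0 0)
    let ys := relevant.map (fun p => PySem.List.pyGetD p 1 0)
    let x_mean := PySem.Int.floordiv xs.sum (n : Int)
    let y_mean := PySem.Int.floordiv ys.sum (n : Int)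
    let x_median := pvSelect xs (n / 2)
    let y_median := pvSelect ys (n / 2)
    let mean_dist := (relevant.map
      (fun p => |x_mean - PySem.List.pyGetD p 0 0| + |y_mean - PySem.List.pyGetD p 1 0|)).sum
    let median_dist := (relevant.map
      (fun p => |x_median - PySem.List.pyGetD p 0 0| + |y_median - PySem.List.pyGetD p 1 0|)).sum
    if mean_dist < median_dist then [x_mean, y_mean] else [x_median, y_median]

-- ===== PRECONDITION & SPEC =====
-- Pre_ excludes exactly the inputs where A raises IndexError: two or more points and some
-- point with fewer than 2 coordinates (A reads i[0] and i[1] of every point).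
def Pre_ideal_place (relevant : List (List Int)) : Prop :=
  relevant.length ≤ 1 ∨ ∀ p ∈ relevant, 2 ≤ p.length
instance (relevant : List (List Int)) : Decidable (Pre_ideal_place relevant) := by
  unfold Pre_ideal_place; infer_instance
def pvWitness_ideal_place : List (List Int) := [[0, 0], [2, 3]]

def Spec_ideal_place (relevant : List (List Int)) (out : List Int) : Prop := out = ideal_place_alt relevant
instance (relevant : List (List Int)) (out : List Int) : Decidable (Spec_ideal_place relevant out) := by unfold Spec_ideal_place; infer_instance

-- ===== CLAIM (what is proved, stated in full; the proofs are below) =====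
def Claim_equal_ideal_place : Prop := ∀ (relevant : List (List Int)), Dom_ideal_place relevant → Pre_ideal_place relevant → Spec_ideal_place relevant (ideal_place relevant)

-- ===== LEMMAS AND PROOFS =====

-- the middle-element pivot is a member of the list
theorem pvMidPivot_mem (a : List Int) (h : a ≠ []) : a.getD (a.length / 2) 0 ∈ a := by
  have hlt : a.length / 2 < a.length :=
    Nat.div_lt_self (List.length_pos_of_ne_nil h) (by omega)
  rw [List.getD_eq_getElem a 0 hlt]
  exact List.getElem_mem hlt

-- filtering away the pivot shrinks the list (shows the fuel below never runs out)
theorem pvFilterPivotLt (a : List Int) (h : ¬ a.length ≤ 1) (q : Int → Bool)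
    (hq : q (a.getD (a.length / 2) 0) = false) : (a.filter q).length < a.length :=
  List.length_filter_lt_length_iff_exists.mpr
    ⟨a.getD (a.length / 2) 0,
     pvMidPivot_mem a (by intro hnil; subst hnil; simp at h),
     by simp only [List.getD_eq_getElem?_getD] at hq; simp [hq]⟩

-- the three-way partition by a pivot is a permutation of the list
theorem pvFilterThreePerm (a : List Int) (p : Int) :
    (a.filter (fun v => decide (v < p)) ++ a.filter (fun v => decide (v = p))
      ++ a.filter (fun v => decide (p < v))).Perm a := by
  induction a with
  | nil => simp
  | cons x t ih =>
    rcases lt_trichotomy x p with h | h | h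
    · simp only [List.filter_cons, decide_eq_true_eq, if_pos h,
        if_neg (by omega : ¬ x = p), if_neg (by omega : ¬ p < x), List.cons_append]
      exact List.Perm.cons x ih
    · simp only [List.filter_cons, decide_eq_true_eq, if_neg (by omega : ¬ x < p),
        if_pos h, if_neg (by omega : ¬ p < x)]
      rw [List.append_assoc, List.cons_append]
      exact List.perm_middle.trans
        (List.Perm.cons x (by rw [← List.append_assoc]; exact ih))
    · simp only [List.filter_cons, decide_eq_true_eq, if_neg (by omega : ¬ x < p),
        if_neg (by omega : ¬ x = p), if_pos h]
      exact List.perm_middle.trans (List.Perm.cons x ih)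

-- sorted(a) splits at a pivot into sorted(<) ++ (=) ++ sorted(>)
theorem pvSortedSplit (a : List Int) (p : Int) :
    PySem.List.sorted a (fun v => v) false =
      PySem.List.sorted (a.filter (fun v => decide (v < p))) (fun v => v) false
        ++ a.filter (fun v => decide (v = p))
        ++ PySem.List.sorted (a.filter (fun v => decide (p < v))) (fun v => v) false := by
  refine PySem.List.sorted_id_eq_of_perm_of_pairwise _ _ ?_ ?_
  · exact (((PySem.List.sorted_perm _ _ _).append (List.Perm.refl _)).append
      (PySem.List.sorted_perm _ _ _)).trans (pvFilterThreePerm a p)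
  · rw [List.pairwise_append, List.pairwise_append]
    refine ⟨⟨?_, ?_, ?_⟩, ?_, ?_⟩
    · simpa using PySem.List.sorted_pairwise (a.filter (fun v => decide (v < p))) (fun v : Int => v)
    · refine List.pairwise_of_forall_mem_list ?_
      intro u hu v hv
      have hu' : u = p := by simpa using (List.mem_filter.mp hu).2
      have hv' : v = p := by simpa using (List.mem_filter.mp hv).2
      omega
    · intro u hu v hv
      have hu' : u < p := by
        simpa using (List.mem_filter.mp ((PySem.List.mem_sorted _ _ _ _).mp hu)).2
      have hv' : v = p := by simpa using (List.mem_filter.mp hv).2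
      omega
    · simpa using PySem.List.sorted_pairwise (a.filter (fun v => decide (p < v))) (fun v : Int => v)
    · intro u hu v hv
      have hv' : p < v := by
        simpa using (List.mem_filter.mp ((PySem.List.mem_sorted _ _ _ _).mp hv)).2
      rcases List.mem_append.mp hu with hu | hu
      · have hu' : u < p := by
          simpa using (List.mem_filter.mp ((PySem.List.mem_sorted _ _ _ _).mp hu)).2
        omega
      · have hu' : u = p := by simpa using (List.mem_filter.mp hu).2
        omega

-- quickselect computes the k-th element of the sorted list
theorem pvSelectGo_eq_sorted : ∀ (fuel : Nat) (a : List Int), a.length ≤ fuel →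
    ∀ k : Nat, k < a.length →
    pvSelectGo fuel a k = (PySem.List.sorted a (fun v => v) false).getD k 0 := by
  intro fuel
  induction fuel with
  | zero => intro a ha k hk; omega
  | succ n ih =>
    intro a ha k hk
    simp only [pvSelectGo]
    by_cases h1 : a.length ≤ 1
    · rw [if_pos h1]
      have hl1 : a.length = 1 := by omega
      obtain ⟨v, hv⟩ : ∃ v, a = [v] := by
        match a, hl1 with | [v], _ => exact ⟨v, rfl⟩
      subst hv
      have hs : PySem.List.sorted [v] (fun x : Int => x) false = [v] :=
        PySem.List.sorted_id_eq_of_perm_of_pairwise [v] [v] (List.Perm.refl _) (by simp)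
      have hk0 : k = 0 := by omega
      simp [hs, hk0]
    · rw [if_neg h1]
      have hne : a ≠ [] := by intro hnil; subst hnil; simp at h1
      have hsplit := pvSortedSplit a (a.getD (a.length / 2) 0)
      have hlen := (pvFilterThreePerm a (a.getD (a.length / 2) 0)).length_eq
      simp only [List.length_append] at hlen
      have hltlen := pvFilterPivotLt a h1 (fun v => decide (v < a.getD (a.length / 2) 0)) (by simp)
      have hgtlen := pvFilterPivotLt a h1 (fun v => decide (a.getD (a.length / 2) 0 < v)) (by simp)
      by_cases h2 : k < (a.filter (fun v => decide (v < a.getD (a.length / 2) 0))).length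
      · rw [if_pos h2, ih _ (by omega) k h2, hsplit]
        rw [List.getD_append _ _ _ _ (by simp only [List.length_append, PySem.List.length_sorted]; omega),
            List.getD_append _ _ _ _ (by simp only [PySem.List.length_sorted]; omega)]
      · rw [if_neg h2]
        by_cases h3 : k < a.length - (a.filter (fun v => decide (a.getD (a.length / 2) 0 < v))).length
        · rw [if_pos h3, hsplit]
          rw [List.getD_append _ _ _ _ (by simp only [List.length_append, PySem.List.length_sorted]; omega),
              List.getD_append_right _ _ _ _ (by simp only [PySem.List.length_sorted]; omega)]
          have hidx : k - (PySem.List.sorted (a.filter (fun v => decide (v < a.getD (a.length / 2) 0))) (fun v => v) false).length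
              < (a.filter (fun v => decide (v = a.getD (a.length / 2) 0))).length := by
            simp only [PySem.List.length_sorted]; omega
          rw [List.getD_eq_getElem _ _ hidx]
          have hmem2 := List.getElem_mem hidx
          have heqp := (List.mem_filter.mp hmem2).2
          simp only [decide_eq_true_eq] at heqp
          omega
        · rw [if_neg h3, ih _ (by omega) _ (by omega), hsplit]
          rw [List.getD_append_right _ _ _ _ (by simp only [List.length_append, PySem.List.length_sorted]; omega)]
          congr 1
          simp only [List.length_append, PySem.List.length_sorted]
          omega

theorem pvSelect_eq_sorted (a : List Int) (k : Nat) (hk : k < a.length) :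
    pvSelect a k = (PySem.List.sorted a (fun v => v) false).getD k 0 :=
  pvSelectGo_eq_sorted a.length a le_rfl k hk

-- x[len(x)//2] of the sorted list is what quickselect returns
theorem pvMedianEq (l : List Int) (hl : l ≠ []) :
    PySem.List.pyGetD (PySem.List.sorted l (fun v => v) false)
        (PySem.Int.floordiv (l.length : Int) 2) 0
      = pvSelect l (l.length / 2) := by
  have h2 : PySem.Int.floordiv (l.length : Int) 2 = ((l.length / 2 : Nat) : Int) := by
    exact_mod_cast PySem.Int.floordiv_natCast l.length 2
  rw [h2, PySem.List.pyGetD_natCast,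
      pvSelect_eq_sorted l _
        (Nat.div_lt_self (List.length_pos_of_ne_nil hl) (by omega))]

-- a 'for i in range(len(xs))' accumulation of ys[i] is the sum of ys (len ys = len xs)
theorem pvRangeFoldlGetD (xs ys : List Int) (h : ys.length = xs.length) :
    (PySem.List.pyRange 0 (xs.length : Int) 1).foldl
      (fun acc j => acc + PySem.List.pyGetD ys j 0) 0 = ys.sum := by
  rw [← h, PySem.List.foldl_pyRange_zero_pyGetD' ys 0 (fun acc v => acc + v) 0,
      PySem.List.foldl_add ys (fun v => v) 0]
  simp

-- ===== VERDICT (by name: the statement is the Claim_ definition above) =====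
theorem ideal_place_spec : Claim_equal_ideal_place := by
  intro relevant _ _
  unfold Spec_ideal_place ideal_place ideal_place_alt
  by_cases h0 : relevant.length = 0
  · rw [if_pos h0, if_pos h0]
  rw [if_neg h0, if_neg h0]
  by_cases h1 : relevant.length = 1
  · rw [if_pos h1, if_pos h1]
  rw [if_neg h1, if_neg h1]
  have hne : relevant ≠ [] := by intro hnil; subst hnil; simp at h0
  rw [PySem.List.foldl_prod_mk
        (f := fun (acc : List Int) i => acc ++ [PySem.List.pyGetD i 0 0])
        (g := fun (acc : List Int) i => acc ++ [PySem.List.pyGetD i 1 0])]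
  simp only [PySem.List.foldl_append_singleton_eq_map, List.nil_append]
  rw [PySem.List.foldl_prod_mk
        (f := fun (acc : Int) j => acc + PySem.List.pyGetD (relevant.map fun p => PySem.List.pyGetD p 0 0) j 0)
        (g := fun (acc : Int) j => acc + PySem.List.pyGetD (relevant.map fun p => PySem.List.pyGetD p 1 0) j 0),
      pvRangeFoldlGetD (relevant.map fun p => PySem.List.pyGetD p 0 0)
        (relevant.map fun p => PySem.List.pyGetD p 0 0) rfl,
      pvRangeFoldlGetD (relevant.map fun p => PySem.List.pyGetD p 0 0)
        (relevant.map fun p => PySem.List.pyGetD p 1 0) (by simp),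
      pvMedianEq (relevant.map fun p => PySem.List.pyGetD p 0 0) (by simp [hne]),
      pvMedianEq (relevant.map fun p => PySem.List.pyGetD p 1 0) (by simp [hne])]
  simp only [List.length_map]
  set XM := PySem.Int.floordiv (relevant.map fun p => PySem.List.pyGetD p 0 0).sum (relevant.length : Int) with hXM
  set YM := PySem.Int.floordiv (relevant.map fun p => PySem.List.pyGetD p 1 0).sum (relevant.length : Int) with hYM
  set XD := pvSelect (relevant.map fun p => PySem.List.pyGetD p 0 0) (relevant.length / 2) with hXD
  set YD := pvSelect (relevant.map fun p => PySem.List.pyGetD p 1 0) (relevant.length / 2) with hYD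
  rw [PySem.List.foldl_prod_mk
        (f := fun (acc : Int) i => acc + (|XM - PySem.List.pyGetD i 0 0| + |YM - PySem.List.pyGetD i 1 0|))
        (g := fun (acc : Int) i => acc + (|XD - PySem.List.pyGetD i 0 0| + |YD - PySem.List.pyGetD i 1 0|))]
  simp only [PySem.List.foldl_add, zero_add]
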